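-- pv_equiv track=rewrite | github.com/facebookresearch/hydra | plugins/examples/example_configsource_plugin/hydra_plugins/example_configsource_plugin/example_configsource_plugin.py | is_config
-- ===== SOURCE A (Python) =====
-- def is_config(config_path: str) -> bool:
--     base = {
--         "dataset",
--         "dataset/imagenet",
--         "level1/level2/nested1",
--         "level1/level2/nested2",
--     }
--     configs = set([x for x in base] + [f"{x}.yaml" for x in base])
--     return config_path in configs
-- ===== SOURCE B (Python) =====
-- def is_config(config_path: str) -> bool:
--     candidate = config_path[:-5] if config_path.endswith(".yaml") else config_path
--     return candidate in (
--         "dataset",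
--         "dataset/imagenet",
--         "level1/level2/nested1",
--         "level1/level2/nested2",
--     )
-- ===== Notes on version B (the rewrite author's own statement) =====
-- stated objective: simpler
-- what changed: Instead of materialising the doubled set of base names plus their '.yaml' variants and testing membership in it, B normalises the query by stripping a trailing '.yaml' and tests the candidate against the 4 base names only.
import Mathlib
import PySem

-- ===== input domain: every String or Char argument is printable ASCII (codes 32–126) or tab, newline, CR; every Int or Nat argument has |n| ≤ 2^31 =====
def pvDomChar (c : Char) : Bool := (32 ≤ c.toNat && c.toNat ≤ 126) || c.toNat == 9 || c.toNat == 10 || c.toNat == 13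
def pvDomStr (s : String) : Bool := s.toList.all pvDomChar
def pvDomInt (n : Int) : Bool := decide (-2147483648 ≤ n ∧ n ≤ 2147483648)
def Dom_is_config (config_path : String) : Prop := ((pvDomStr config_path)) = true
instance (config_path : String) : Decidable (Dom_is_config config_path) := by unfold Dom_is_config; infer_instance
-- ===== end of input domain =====

-- B strips a trailing ".yaml" from the query and compares against the 4 base names,
-- instead of materialising the doubled set of base names plus their ".yaml" variants (objective: simpler).


-- ===== PORT A =====
def is_config (config_path : String) : Bool :=
  let base : PySem.Set String := PySem.Set.ofList
    [ "dataset"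
    , "dataset/imagenet"
    , "level1/level2/nested1"
    , "level1/level2/nested2" ]
  let configs : PySem.Set String :=
    PySem.Set.ofList ((base.map (fun x => x)) ++ (base.map (fun x => x ++ ".yaml")))
  PySem.Set.contains configs config_path

-- ===== PORT B =====
def is_config_alt (config_path : String) : Bool :=
  let candidate : String :=
    if PySem.Str.endswith config_path ".yaml"
    then PySem.Str.slice config_path none (some (-5))
    else config_path
  candidate == "dataset" || candidate == "dataset/imagenet" ||
    candidate == "level1/level2/nested1" || candidate == "level1/level2/nested2"

-- ===== PRECONDITION & SPEC =====
def Spec_is_config (config_path : String) (out : Bool) : Prop := out = is_config_alt config_path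
instance (config_path : String) (out : Bool) : Decidable (Spec_is_config config_path out) := by unfold Spec_is_config; infer_instance

-- ===== CLAIM (what is proved, stated in full; the proofs are below) =====
def Claim_equal_is_config : Prop := ∀ (config_path : String), Dom_is_config config_path → Spec_is_config config_path (is_config config_path)

-- ===== LEMMAS AND PROOFS =====
def yamlSuf : List Char := ".yaml".toList

theorem hA_members (cp : String) : is_config cp = true ↔ (cp = "dataset" ∨ cp = "dataset/imagenet" ∨ cp = "level1/level2/nested1" ∨ cp = "level1/level2/nested2" ∨ cp = "dataset.yaml" ∨ cp = "dataset/imagenet.yaml" ∨ cp = "level1/level2/nested1.yaml" ∨ cp = "level1/level2/nested2.yaml") := by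
  simp [is_config, PySem.Set.contains]
  tauto

theorem toList_inj (s t : String) : s = t ↔ s.toList = t.toList := by
  constructor
  · intro h; rw [h]
  · intro h; exact String.ext (by simpa [String.toList] using h)

theorem app_ne (m b : List Char) (h : ¬ yamlSuf <:+ b) : ¬ (m ++ yamlSuf = b) :=
  fun he => h (he ▸ List.suffix_append m yamlSuf)

theorem app_eq_iff (m b : List Char) : (m ++ yamlSuf = b ++ yamlSuf) ↔ m = b := by simp

theorem dy : ("dataset.yaml":String).toList = ("dataset":String).toList ++ yamlSuf := by decide
theorem iy : ("dataset/imagenet.yaml":String).toList = ("dataset/imagenet":String).toList ++ yamlSuf := by decide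
theorem n1y : ("level1/level2/nested1.yaml":String).toList = ("level1/level2/nested1":String).toList ++ yamlSuf := by decide
theorem n2y : ("level1/level2/nested2.yaml":String).toList = ("level1/level2/nested2":String).toList ++ yamlSuf := by decide

theorem main_eq (cp : String) : is_config cp = is_config_alt cp := by
  rw [Bool.eq_iff_iff, hA_members]
  by_cases h : PySem.Str.endswith cp ".yaml" = true
  · have hsuf : yamlSuf <:+ cp.toList := by
      rw [PySem.Str.endswith_eq] at h
      exact (PySem.Chars.endswith_iff _ _).mp h
    obtain ⟨m, hm⟩ := hsuf
    have hlen : (m ++ yamlSuf).length - 5 = m.length := by simp [yamlSuf]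
    have hcand : (PySem.Str.slice cp none (some (-5))).toList = m := by
      rw [PySem.Str.toList_slice, PySem.Chars.slice_eq_listSlice,
          PySem.List.slice_to_neg_ofNat _ 5 (by omega), ← hm, hlen, List.take_left]
    simp only [is_config_alt, h, if_true, Bool.or_eq_true, beq_iff_eq,
               toList_inj, hcand, ← hm, dy, iy, n1y, n2y, app_eq_iff]
    constructor
    · rintro (h1|h1|h1|h1|h1|h1|h1|h1)
      · exact absurd h1 (app_ne m _ (by decide))
      · exact absurd h1 (app_ne m _ (by decide))
      · exact absurd h1 (app_ne m _ (by decide))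
      · exact absurd h1 (app_ne m _ (by decide))
      · exact Or.inl (Or.inl (Or.inl h1))
      · exact Or.inl (Or.inl (Or.inr h1))
      · exact Or.inl (Or.inr h1)
      · exact Or.inr h1
    · rintro (((h1|h1)|h1)|h1)
      · exact Or.inr (Or.inr (Or.inr (Or.inr (Or.inl h1))))
      · exact Or.inr (Or.inr (Or.inr (Or.inr (Or.inr (Or.inl h1)))))
      · exact Or.inr (Or.inr (Or.inr (Or.inr (Or.inr (Or.inr (Or.inl h1))))))
      · exact Or.inr (Or.inr (Or.inr (Or.inr (Or.inr (Or.inr (Or.inr h1))))))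
  · have hns : ¬ (yamlSuf <:+ cp.toList) := by
      rw [PySem.Str.endswith_eq] at h
      intro hc; exact h ((PySem.Chars.endswith_iff _ _).mpr hc)
    rw [Bool.not_eq_true] at h
    simp only [is_config_alt, h, Bool.false_eq_true, if_false, Bool.or_eq_true, beq_iff_eq]
    constructor
    · rintro (h1|h1|h1|h1|h1|h1|h1|h1)
      · exact Or.inl (Or.inl (Or.inl h1))
      · exact Or.inl (Or.inl (Or.inr h1))
      · exact Or.inl (Or.inr h1)
      · exact Or.inr h1
      · subst h1; exact absurd (by decide) hns
      · subst h1; exact absurd (by decide) hns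
      · subst h1; exact absurd (by decide) hns
      · subst h1; exact absurd (by decide) hns
    · rintro (((h1|h1)|h1)|h1)
      · exact Or.inl h1
      · exact Or.inr (Or.inl h1)
      · exact Or.inr (Or.inr (Or.inl h1))
      · exact Or.inr (Or.inr (Or.inr (Or.inl h1)))

-- ===== VERDICT (by name: the statement is the Claim_ definition above) =====
theorem is_config_spec : Claim_equal_is_config := by
  intro cp _
  unfold Spec_is_config
  exact main_eq cp
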